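-- pv_equiv track=rewrite | github.com/marslite/DSA-review | Week_1/coding_challenge.py | convert_to_gradebook
-- ===== SOURCE A (Python) =====
-- def convert_to_gradebook(input_dict: dict[str, int]) -> dict[str, int]:
--   finals = {"A":0, "B":0, "C":0, "F":0}
--   for student, score in input_dict.items():
--     if 90 <= score <= 100:
--       finals["A"] += 1
--     elif 80 <= score <= 89:
--       finals["B"] += 1
--     elif 70 <= score <= 79:
--       finals["C"] +=1
--     else:
--       finals["F"] += 1
--   return finals
-- ===== SOURCE B (Python) =====
-- def convert_to_gradebook(input_dict: dict[str, int]) -> dict[str, int]: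
--   scores = list(input_dict.values())
--   a = sum(1 for s in scores if 90 <= s <= 100)
--   b = sum(1 for s in scores if 80 <= s <= 89)
--   c = sum(1 for s in scores if 70 <= s <= 79)
--   return {"A": a, "B": b, "C": c, "F": len(scores) - a - b - c}
-- ===== Notes on version B (the rewrite author's own statement) =====
-- stated objective: alternative
-- what changed: Replaces the single branching pass that mutates a four-key counter dict with independent filtered counts over the values (one sum per grade bucket) plus F as the length complement, assembling the result dict once at the end.
import Mathlib
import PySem

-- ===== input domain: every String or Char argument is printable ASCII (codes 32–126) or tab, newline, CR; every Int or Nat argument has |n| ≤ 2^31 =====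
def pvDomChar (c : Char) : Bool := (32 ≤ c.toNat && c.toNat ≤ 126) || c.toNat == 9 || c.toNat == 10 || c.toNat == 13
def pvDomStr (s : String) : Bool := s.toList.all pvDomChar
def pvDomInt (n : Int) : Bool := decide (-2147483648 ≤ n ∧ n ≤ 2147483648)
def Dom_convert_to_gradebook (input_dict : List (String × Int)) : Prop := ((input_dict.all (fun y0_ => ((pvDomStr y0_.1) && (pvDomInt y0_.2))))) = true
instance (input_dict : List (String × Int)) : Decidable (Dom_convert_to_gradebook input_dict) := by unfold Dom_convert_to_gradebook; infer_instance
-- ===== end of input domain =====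

-- B replaces A's single branching pass over a mutated counter dict by one filtered
-- count per grade bucket over the values, with F as the length complement (objective: alternative).

-- ===== PORT A =====
-- one pass over the items, bumping one of four counters in an insertion-ordered dict
def convert_to_gradebook (input_dict : List (String × Int)) : List (String × Int) :=
  let finals : PySem.Dict String Int :=
    PySem.Dict.mk [("A", 0), ("B", 0), ("C", 0), ("F", 0)]
  (input_dict.foldl (fun finals p =>
      if 90 ≤ p.2 ∧ p.2 ≤ 100 then finals.modify "A" 0 (· + 1)
      else if 80 ≤ p.2 ∧ p.2 ≤ 89 then finals.modify "B" 0 (· + 1)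
      else if 70 ≤ p.2 ∧ p.2 ≤ 79 then finals.modify "C" 0 (· + 1)
      else finals.modify "F" 0 (· + 1)) finals).items

-- ===== PORT B =====
-- independent filtered counts over the values; F is the length complement
def convert_to_gradebook_alt (input_dict : List (String × Int)) : List (String × Int) :=
  let scores := input_dict.map (·.2)
  let a : Int := scores.countP (fun s => decide (90 ≤ s ∧ s ≤ 100))
  let b : Int := scores.countP (fun s => decide (80 ≤ s ∧ s ≤ 89))
  let c : Int := scores.countP (fun s => decide (70 ≤ s ∧ s ≤ 79))
  [("A", a), ("B", b), ("C", c), ("F", (scores.length : Int) - a - b - c)]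

-- ===== PRECONDITION & SPEC =====
def Spec_convert_to_gradebook (input_dict : List (String × Int)) (out : List (String × Int)) : Prop := out = convert_to_gradebook_alt input_dict
instance (input_dict : List (String × Int)) (out : List (String × Int)) : Decidable (Spec_convert_to_gradebook input_dict out) := by unfold Spec_convert_to_gradebook; infer_instance

-- ===== CLAIM (what is proved, stated in full; the proofs are below) =====
def Claim_equal_convert_to_gradebook : Prop := ∀ (input_dict : List (String × Int)), Dom_convert_to_gradebook input_dict → Spec_convert_to_gradebook input_dict (convert_to_gradebook input_dict)

-- ===== LEMMAS AND PROOFS =====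

def pvPA (p : String × Int) : Bool := decide (90 ≤ p.2 ∧ p.2 ≤ 100)
def pvPB (p : String × Int) : Bool := decide (80 ≤ p.2 ∧ p.2 ≤ 89)
def pvPC (p : String × Int) : Bool := decide (70 ≤ p.2 ∧ p.2 ≤ 79)
def pvPF (p : String × Int) : Bool := !pvPA p && !pvPB p && !pvPC p

def pvGStep (d : PySem.Dict String Int) (p : String × Int) : PySem.Dict String Int :=
  if 90 ≤ p.2 ∧ p.2 ≤ 100 then d.modify "A" 0 (· + 1)
  else if 80 ≤ p.2 ∧ p.2 ≤ 89 then d.modify "B" 0 (· + 1)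
  else if 70 ≤ p.2 ∧ p.2 ≤ 79 then d.modify "C" 0 (· + 1)
  else d.modify "F" 0 (· + 1)

lemma pv_fold_items (xs : List (String × Int)) : ∀ (a b c f : Int),
    (xs.foldl pvGStep (PySem.Dict.mk [("A", a), ("B", b), ("C", c), ("F", f)])).items
    = [("A", a + (xs.countP pvPA : Int)), ("B", b + (xs.countP pvPB : Int)),
       ("C", c + (xs.countP pvPC : Int)), ("F", f + (xs.countP pvPF : Int))] := by
  induction xs with
  | nil => intro a b c f; simp [PySem.Dict.items]
  | cons p xs ih =>
    intro a b c f
    have hcons : ∀ (q : (String × Int) → Bool), (p :: xs).countP q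
        = xs.countP q + (if q p then 1 else 0) := by
      intro q; by_cases hq : q p <;> simp [List.countP_cons, hq]
    by_cases hA : 90 ≤ p.2 ∧ p.2 ≤ 100
    · have hstep : pvGStep (PySem.Dict.mk [("A", a), ("B", b), ("C", c), ("F", f)]) p
          = PySem.Dict.mk [("A", a + 1), ("B", b), ("C", c), ("F", f)] := by
        simp only [pvGStep, if_pos hA]; rfl
      rw [List.foldl_cons, hstep, ih]
      have h1 : pvPA p = true := by simp [pvPA, hA]
      have h2 : pvPB p = false := by simp [pvPB]; omega
      have h3 : pvPC p = false := by simp [pvPC]; omega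
      have h4 : pvPF p = false := by simp [pvPF, h1]
      simp only [hcons, h1, h2, h3, h4, if_true, if_false]
      push_cast; norm_num; ring
    · by_cases hB : 80 ≤ p.2 ∧ p.2 ≤ 89
      · have hstep : pvGStep (PySem.Dict.mk [("A", a), ("B", b), ("C", c), ("F", f)]) p
            = PySem.Dict.mk [("A", a), ("B", b + 1), ("C", c), ("F", f)] := by
          simp only [pvGStep, if_neg hA, if_pos hB]; rfl
        rw [List.foldl_cons, hstep, ih]
        have h1 : pvPA p = false := by simp [pvPA, hA]
        have h2 : pvPB p = true := by simp [pvPB, hB]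
        have h3 : pvPC p = false := by simp [pvPC]; omega
        have h4 : pvPF p = false := by simp [pvPF, h2]
        simp only [hcons, h1, h2, h3, h4, if_true, if_false]
        push_cast; norm_num; ring
      · by_cases hC : 70 ≤ p.2 ∧ p.2 ≤ 79
        · have hstep : pvGStep (PySem.Dict.mk [("A", a), ("B", b), ("C", c), ("F", f)]) p
              = PySem.Dict.mk [("A", a), ("B", b), ("C", c + 1), ("F", f)] := by
            simp only [pvGStep, if_neg hA, if_neg hB, if_pos hC]; rfl
          rw [List.foldl_cons, hstep, ih]
          have h1 : pvPA p = false := by simp [pvPA, hA]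
          have h2 : pvPB p = false := by simp [pvPB, hB]
          have h3 : pvPC p = true := by simp [pvPC, hC]
          have h4 : pvPF p = false := by simp [pvPF, h3]
          simp only [hcons, h1, h2, h3, h4, if_true, if_false]
          push_cast; norm_num; ring
        · have hstep : pvGStep (PySem.Dict.mk [("A", a), ("B", b), ("C", c), ("F", f)]) p
              = PySem.Dict.mk [("A", a), ("B", b), ("C", c), ("F", f + 1)] := by
            simp only [pvGStep, if_neg hA, if_neg hB, if_neg hC]; rfl
          rw [List.foldl_cons, hstep, ih]
          have h1 : pvPA p = false := by simp [pvPA, hA]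
          have h2 : pvPB p = false := by simp [pvPB, hB]
          have h3 : pvPC p = false := by simp [pvPC, hC]
          have h4 : pvPF p = true := by simp [pvPF, h1, h2, h3]
          simp only [hcons, h1, h2, h3, h4, if_true, if_false]
          push_cast; norm_num; ring

lemma pv_count_total (xs : List (String × Int)) :
    xs.countP pvPA + xs.countP pvPB + xs.countP pvPC + xs.countP pvPF = xs.length := by
  induction xs with
  | nil => simp
  | cons p xs ih =>
    rcases Bool.eq_false_or_eq_true (pvPA p) with hA | hA <;>
      rcases Bool.eq_false_or_eq_true (pvPB p) with hB | hB <;>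
        rcases Bool.eq_false_or_eq_true (pvPC p) with hC | hC <;>
          have h4 : pvPF p = (!pvPA p && !pvPB p && !pvPC p) := rfl <;>
          rw [hA, hB, hC] at h4 <;> simp only [Bool.not_false, Bool.not_true,
            Bool.and_self, Bool.false_and, Bool.and_false, Bool.true_and, Bool.and_true] at h4 <;>
          simp [List.countP_cons, hA, hB, hC, h4] <;>
          simp only [pvPA, pvPB, pvPC, decide_eq_true_eq, decide_eq_false_iff_not] at hA hB hC <;> omega

-- ===== VERDICT (by name: the statement is the Claim_ definition above) =====
theorem convert_to_gradebook_spec : Claim_equal_convert_to_gradebook := by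
  intro xs _
  show convert_to_gradebook xs = convert_to_gradebook_alt xs
  have htot := pv_count_total xs
  simp only [convert_to_gradebook, convert_to_gradebook_alt]
  show (xs.foldl pvGStep _).items = _
  rw [pv_fold_items xs 0 0 0 0]
  have eA : (xs.map (·.2)).countP (fun s => decide (90 ≤ s ∧ s ≤ 100)) = xs.countP pvPA := by
    rw [List.countP_map]; rfl
  have eB : (xs.map (·.2)).countP (fun s => decide (80 ≤ s ∧ s ≤ 89)) = xs.countP pvPB := by
    rw [List.countP_map]; rfl
  have eC : (xs.map (·.2)).countP (fun s => decide (70 ≤ s ∧ s ≤ 79)) = xs.countP pvPC := by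
    rw [List.countP_map]; rfl
  simp only [eA, eB, eC, List.length_map, zero_add]
  have hF : (xs.countP pvPF : Int)
      = (xs.length : Int) - xs.countP pvPA - xs.countP pvPB - xs.countP pvPC := by omega
  rw [hF]
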